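-- pv_equiv track=rewrite | github.com/Jason-Guillaume/AITestProject | testcase/services/case_subtypes.py | split_typed_payload_update
-- ===== SOURCE A (Python) =====
-- from typing import Any, Dict, Optional, Tuple, Type
--
-- API_FIELD_KEYS = (
--     "api_url",
--     "api_method",
--     "api_headers",
--     "api_body",
--     "api_expected_status",
--     "api_source_curl",
-- )
--
-- PERF_FIELD_KEYS = ("concurrency", "duration_seconds", "target_rps")
--
-- SECURITY_FIELD_KEYS = ("attack_surface", "tool_preset", "risk_level")
--
-- UI_FIELD_KEYS = ("app_under_test", "primary_locator", "automation_framework")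
--
-- def split_typed_payload_update(validated_data: dict) -> Tuple[dict, dict, dict, dict]:
--     """更新：仅处理请求体里显式出现的子类字段。"""
--
--     def pick(keys: Tuple[str, ...]) -> Dict[str, Any]:
--         return {k: validated_data.pop(k) for k in keys if k in validated_data}
--
--     return (
--         pick(API_FIELD_KEYS),
--         pick(PERF_FIELD_KEYS),
--         pick(SECURITY_FIELD_KEYS),
--         pick(UI_FIELD_KEYS),
--     )
-- ===== SOURCE B (Python) =====
-- _GROUPS = (
--     ("api_url", "api_method", "api_headers", "api_body",
--      "api_expected_status", "api_source_curl"),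
--     ("concurrency", "duration_seconds", "target_rps"),
--     ("attack_surface", "tool_preset", "risk_level"),
--     ("app_under_test", "primary_locator", "automation_framework"),
-- )
-- _GROUP_OF = {k: (g, i) for g, keys in enumerate(_GROUPS) for i, k in enumerate(keys)}
--
--
-- def split_typed_payload_update(validated_data: dict):
--     """One pass over the data through an index table, placing each recognized
--     key into its fixed slot so every result dict keeps schema order."""
--     slots = [[None] * len(keys) for keys in _GROUPS]
--     for k, v in list(validated_data.items()):
--         pos = _GROUP_OF.get(k)
--         if pos is not None:
--             slots[pos[0]][pos[1]] = (k, v)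
--             del validated_data[k]
--     return tuple(dict(s for s in row if s is not None) for row in slots)
-- ===== Notes on version B (the rewrite author's own statement) =====
-- stated objective: alternative
-- what changed: Instead of four per-group scans that each probe the dict key by key, B makes one pass over the data, routing each pair through a precomputed reverse index into a fixed slot array so every result dict still comes out in schema order.
import Mathlib
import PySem

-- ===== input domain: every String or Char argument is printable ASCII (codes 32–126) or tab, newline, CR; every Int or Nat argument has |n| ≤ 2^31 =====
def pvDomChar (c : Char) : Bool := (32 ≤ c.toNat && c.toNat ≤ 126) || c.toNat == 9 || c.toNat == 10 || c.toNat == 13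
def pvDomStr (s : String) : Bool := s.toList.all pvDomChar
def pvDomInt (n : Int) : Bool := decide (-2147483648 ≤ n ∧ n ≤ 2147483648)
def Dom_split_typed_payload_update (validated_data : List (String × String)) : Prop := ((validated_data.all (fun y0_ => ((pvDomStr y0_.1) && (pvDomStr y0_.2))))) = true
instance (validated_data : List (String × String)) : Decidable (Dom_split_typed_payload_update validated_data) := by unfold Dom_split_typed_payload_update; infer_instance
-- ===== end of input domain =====

-- B replaces A's four per-group scans of the dict by ONE pass over the data through a reverse index
-- table, placing each recognized pair into a fixed slot (objective: alternative decomposition, same cost).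
-- Both versions pop the matched keys out of `validated_data` in place; the equivalence proved here is
-- about the RETURN value (the Lean ports are pure).

-- module constants (shared by both versions, as in the Python module)
def pvApiKeys : List String :=
  ["api_url", "api_method", "api_headers", "api_body", "api_expected_status", "api_source_curl"]
def pvPerfKeys : List String := ["concurrency", "duration_seconds", "target_rps"]
def pvSecurityKeys : List String := ["attack_surface", "tool_preset", "risk_level"]
def pvUiKeys : List String := ["app_under_test", "primary_locator", "automation_framework"]

-- ===== PORT A =====
-- pick(keys): {k: validated_data.pop(k) for k in keys if k in validated_data};
-- the comprehension's dict has pairwise-distinct keys, so it IS the assoc list built in key order.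
def pvPick (keys : List String) (d : PySem.Dict String String) :
    List (String × String) × PySem.Dict String String :=
  match keys with
  | [] => ([], d)
  | k :: ks =>
    if d.contains k then
      match d.pop? k with
      | some vd => let r := pvPick ks vd.2; ((k, vd.1) :: r.1, r.2)
      | none => pvPick ks d   -- unreachable: d.contains k
    else pvPick ks d

def split_typed_payload_update (validated_data : List (String × String)) :
    List (List (String × String)) :=
  let d := PySem.Dict.ofList validated_data   -- the argument is a Python dict
  let p1 := pvPick pvApiKeys d
  let p2 := pvPick pvPerfKeys p1.2
  let p3 := pvPick pvSecurityKeys p2.2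
  let p4 := pvPick pvUiKeys p3.2
  [p1.1, p2.1, p3.1, p4.1]

-- ===== PORT B =====
def pvGroups : List (List String) := [pvApiKeys, pvPerfKeys, pvSecurityKeys, pvUiKeys]

-- _GROUP_OF = {k: (g, i) for g, keys in enumerate(_GROUPS) for i, k in enumerate(keys)}
def pvGroupOf : PySem.Dict String (Int × Int) :=
  PySem.Dict.ofList ((PySem.List.enumerate pvGroups).flatMap
    (fun gks => (PySem.List.enumerate gks.2).map (fun ik => (ik.2, (gks.1, ik.1)))))

-- loop body: slots[pos[0]][pos[1]] = (k, v)  (the `del validated_data[k]` only mutates the argument)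
def pvStepB (s : List (List (Option (String × String)))) (kv : String × String) :
    List (List (Option (String × String))) :=
  match pvGroupOf.get? kv.1 with
  | some gi =>
      PySem.List.pySetD s gi.1 (PySem.List.pySetD (PySem.List.pyGetD s gi.1 []) gi.2 (some kv))
  | none => s

def split_typed_payload_update_alt (validated_data : List (String × String)) :
    List (List (String × String)) :=
  let d := PySem.Dict.ofList validated_data   -- the argument is a Python dict
  let slots0 := pvGroups.map (fun ks => ks.map (fun _ => (none : Option (String × String))))
  let slots := d.items.foldl pvStepB slots0
  -- dict(s for s in row if s is not None): distinct keys, so it is the filtered assoc list itself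
  slots.map (fun row => row.filterMap id)

-- ===== PRECONDITION & SPEC =====
def Spec_split_typed_payload_update (validated_data : List (String × String)) (out : List (List (String × String))) : Prop := out = split_typed_payload_update_alt validated_data
instance (validated_data : List (String × String)) (out : List (List (String × String))) : Decidable (Spec_split_typed_payload_update validated_data out) := by unfold Spec_split_typed_payload_update; infer_instance

-- ===== CLAIM (what is proved, stated in full; the proofs are below) =====
def Claim_equal_split_typed_payload_update : Prop := ∀ (validated_data : List (String × String)), Dom_split_typed_payload_update validated_data → Spec_split_typed_payload_update validated_data (split_typed_payload_update validated_data)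

-- ===== LEMMAS AND PROOFS =====


theorem pvFind?_filter_ne (l : List (String × String)) (k k' : String) (h : k' ≠ k) :
    List.find? (fun p => p.1 == k') (l.filter (fun p => !(p.1 == k))) =
      List.find? (fun p => p.1 == k') l := by
  induction l with
  | nil => rfl
  | cons p l ih =>
    cases hb : (p.1 == k) with
    | true =>
      have hk : p.1 = k := by simpa using hb
      have h1 : (p.1 == k') = false := by
        simp only [beq_eq_false_iff_ne]; exact fun e => h (hk ▸ e).symm
      simp [hb, h1, ih]
    | false =>
      cases hb' : (p.1 == k') <;> simp [hb, hb', ih]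

theorem pvErase_get?_ne (d : PySem.Dict String String) (k k' : String) (h : k' ≠ k) :
    (d.erase k).get? k' = d.get? k' := by
  cases d with
  | mk items => simp [PySem.Dict.erase, PySem.Dict.get?, pvFind?_filter_ne items k k' h]

theorem pvPick_snd (keys : List String) (d : PySem.Dict String String) (k' : String)
    (h : k' ∉ keys) : ((pvPick keys d).2).get? k' = d.get? k' := by
  induction keys generalizing d with
  | nil => rfl
  | cons k ks ih =>
    have hk : k' ≠ k := fun e => h (e ▸ List.mem_cons_self)
    have hks : k' ∉ ks := fun m => h (List.mem_cons_of_mem _ m)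
    cases hc : d.contains k with
    | false => simpa [pvPick, hc] using ih d hks
    | true =>
      have hs : (d.get? k).isSome := by
        have hc' := hc; rw [PySem.Dict.contains_eq_isSome_get?] at hc'
        exact hc' ▸ rfl
      obtain ⟨v, hv⟩ := Option.isSome_iff_exists.mp hs
      simp only [pvPick, hc, if_true, PySem.Dict.pop?, hv, Option.map_some]
      rw [ih _ hks, pvErase_get?_ne d k k' hk]

theorem pvPick_fst (keys : List String) (hnd : keys.Nodup) (d : PySem.Dict String String) :
    (pvPick keys d).1 = keys.filterMap (fun k => (d.get? k).map (fun v => (k, v))) := by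
  induction keys generalizing d with
  | nil => rfl
  | cons k ks ih =>
    have hk : k ∉ ks := (List.nodup_cons.mp hnd).1
    have hnd' : ks.Nodup := (List.nodup_cons.mp hnd).2
    cases hc : d.contains k with
    | false =>
      have hn : d.get? k = none := by
        cases ho : d.get? k with
        | none => rfl
        | some v =>
          have hc' := hc; rw [PySem.Dict.contains_eq_isSome_get?, ho] at hc'; simp at hc' 
      simp [pvPick, hc, hn, ih hnd' d]
    | true =>
      have hs : (d.get? k).isSome := by
        have hc' := hc; rw [PySem.Dict.contains_eq_isSome_get?] at hc'
        exact hc' ▸ rfl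
      obtain ⟨v, hv⟩ := Option.isSome_iff_exists.mp hs
      simp only [pvPick, hc, if_true, PySem.Dict.pop?, hv, Option.map_some, List.filterMap_cons]
      rw [ih hnd' (d.erase k)]
      congr 1
      exact List.filterMap_congr (fun x hx => by
        rw [pvErase_get?_ne d k x (fun e => hk (e ▸ hx))])

def pvLastVal (l : List (String × String)) (k : String) : Option String :=
  match l with
  | [] => none
  | p :: rest =>
    match pvLastVal rest k with
    | some v => some v
    | none => if p.1 = k then some p.2 else none

theorem pvLastVal_not_mem (l : List (String × String)) (k : String)
    (h : k ∉ l.map Prod.fst) : pvLastVal l k = none := by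
  induction l with
  | nil => rfl
  | cons p rest ih =>
    have h1 : p.1 ≠ k := fun e => h (by simp [e])
    have h2 : k ∉ rest.map Prod.fst := fun m => h (by simp; right; simpa using m)
    simp [pvLastVal, ih h2, h1]

theorem pvLastVal_get? (l : List (String × String)) (hnd : (l.map Prod.fst).Nodup) (k : String) :
    pvLastVal l k = (PySem.Dict.mk l).get? k := by
  induction l with
  | nil => rfl
  | cons p rest ih =>
    rw [List.map_cons] at hnd
    have hp : p.1 ∉ rest.map Prod.fst := (List.nodup_cons.mp hnd).1
    have hnd' : (rest.map Prod.fst).Nodup := (List.nodup_cons.mp hnd).2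
    by_cases he : p.1 = k
    · have : pvLastVal rest k = none := pvLastVal_not_mem rest k (he ▸ hp)
      simp [pvLastVal, this, he, PySem.Dict.get?, List.find?]
    · have hb : (p.1 == k) = false := by simpa using he
      simp only [pvLastVal, ih hnd', PySem.Dict.get?, List.find?, hb]
      cases List.find? (fun q => q.1 == k) rest <;> simp [he]

def pvKeyAt (g i : Nat) : String := (pvGroups.getD g []).getD i ""

def pvCell (s : List (List (Option (String × String)))) (g i : Nat) :
    Option (String × String) :=
  PySem.List.pyGetD (PySem.List.pyGetD s (g : Int) []) (i : Int) none

def pvLens : List Nat := [6, 3, 3, 3]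

theorem pvGroupOf_mem (p : String × (Int × Int)) (hp : p ∈ pvGroupOf.items) :
    ∃ g i : Nat, p.2 = ((g : Int), (i : Int)) ∧ g < 4 ∧ i < pvLens.getD g 0 ∧ pvKeyAt g i = p.1 := by
  have hit : pvGroupOf.items =
      [("api_url", ((0:Int),(0:Int))), ("api_method", ((0:Int),(1:Int))),
       ("api_headers", ((0:Int),(2:Int))), ("api_body", ((0:Int),(3:Int))),
       ("api_expected_status", ((0:Int),(4:Int))), ("api_source_curl", ((0:Int),(5:Int))),
       ("concurrency", ((1:Int),(0:Int))), ("duration_seconds", ((1:Int),(1:Int))),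
       ("target_rps", ((1:Int),(2:Int))),
       ("attack_surface", ((2:Int),(0:Int))), ("tool_preset", ((2:Int),(1:Int))),
       ("risk_level", ((2:Int),(2:Int))),
       ("app_under_test", ((3:Int),(0:Int))), ("primary_locator", ((3:Int),(1:Int))),
       ("automation_framework", ((3:Int),(2:Int)))] := by decide
  rw [hit] at hp
  fin_cases hp
  · exact ⟨0, 0, by decide, by decide, by decide, by decide⟩
  · exact ⟨0, 1, by decide, by decide, by decide, by decide⟩
  · exact ⟨0, 2, by decide, by decide, by decide, by decide⟩
  · exact ⟨0, 3, by decide, by decide, by decide, by decide⟩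
  · exact ⟨0, 4, by decide, by decide, by decide, by decide⟩
  · exact ⟨0, 5, by decide, by decide, by decide, by decide⟩
  · exact ⟨1, 0, by decide, by decide, by decide, by decide⟩
  · exact ⟨1, 1, by decide, by decide, by decide, by decide⟩
  · exact ⟨1, 2, by decide, by decide, by decide, by decide⟩
  · exact ⟨2, 0, by decide, by decide, by decide, by decide⟩
  · exact ⟨2, 1, by decide, by decide, by decide, by decide⟩
  · exact ⟨2, 2, by decide, by decide, by decide, by decide⟩
  · exact ⟨3, 0, by decide, by decide, by decide, by decide⟩
  · exact ⟨3, 1, by decide, by decide, by decide, by decide⟩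
  · exact ⟨3, 2, by decide, by decide, by decide, by decide⟩

theorem pvGroupOf_key (g i : Nat) (hg : g < 4) (hi : i < pvLens.getD g 0) :
    pvGroupOf.get? (pvKeyAt g i) = some ((g : Int), (i : Int)) := by
  interval_cases g <;> simp [pvLens] at hi <;> interval_cases i <;> decide

theorem pvLen_of_shape (s : List (List (Option (String × String))))
    (hs : s.map List.length = pvLens) : s.length = 4 := by
  have := congrArg List.length hs
  simpa [pvLens] using this

theorem pvRowLen_of_shape (s : List (List (Option (String × String))))
    (hs : s.map List.length = pvLens) (g : Nat) (hg : g < 4) :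
    (s.getD g []).length = pvLens.getD g 0 := by
  have hlen : s.length = 4 := pvLen_of_shape s hs
  have h1 : (s.map List.length)[g]? = pvLens[g]? := by rw [hs]
  rw [List.getElem?_map] at h1
  cases ho : s[g]? with
  | none => rw [List.getElem?_eq_none_iff] at ho; omega
  | some row =>
    rw [ho] at h1
    have : pvLens[g]? = some row.length := by simpa using h1.symm
    rw [List.getD_eq_getElem?_getD, ho, List.getD_eq_getElem?_getD, this]
    rfl

theorem pvStepB_shape (s : List (List (Option (String × String))))
    (hs : s.map List.length = pvLens) (kv : String × String) :
    (pvStepB s kv).map List.length = pvLens := by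
  unfold pvStepB
  cases hgo : pvGroupOf.get? kv.1 with
  | none => exact hs
  | some gi =>
    obtain ⟨g', i', hgi, hg', hi', hkey⟩ :=
      pvGroupOf_mem (kv.1, gi) (PySem.Dict.mem_items_of_get?_eq_some _ hgo)
    simp only at hgi
    subst hgi
    dsimp only
    rw [PySem.List.pySetD_natCast]
    rw [List.map_set]
    have hrow : (PySem.List.pySetD (PySem.List.pyGetD s (g' : Int) []) (i' : Int)
        (some kv)).length = pvLens.getD g' 0 := by
      rw [PySem.List.length_pySetD, PySem.List.pyGetD_natCast]
      exact pvRowLen_of_shape s hs g' hg'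
    rw [hrow, hs]
    have : pvLens.getD g' 0 = pvLens[g']'(by simp [pvLens]; omega) := by
      rw [List.getD_eq_getElem?_getD, List.getElem?_eq_getElem (by simp [pvLens]; omega)]
      rfl
    rw [this, List.set_getElem_self]

theorem pvKeyAt_inj (g i g' i' : Nat) (hg : g < 4) (hi : i < pvLens.getD g 0)
    (hg' : g' < 4) (hi' : i' < pvLens.getD g' 0) (h : pvKeyAt g i = pvKeyAt g' i') :
    g = g' ∧ i = i' := by
  have h1 := pvGroupOf_key g i hg hi
  have h2 := pvGroupOf_key g' i' hg' hi'
  rw [h] at h1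
  rw [h1] at h2
  have := Option.some.inj h2
  have hga : (g : Int) = (g' : Int) := congrArg Prod.fst this
  have hia : (i : Int) = (i' : Int) := congrArg Prod.snd this
  exact ⟨Nat.cast_injective hga, Nat.cast_injective hia⟩

theorem pvCellStep (s : List (List (Option (String × String))))
    (hs : s.map List.length = pvLens) (kv : String × String) (g i : Nat)
    (hg : g < 4) (hi : i < pvLens.getD g 0) :
    pvCell (pvStepB s kv) g i =
      if pvKeyAt g i = kv.1 then some kv else pvCell s g i := by
  unfold pvStepB
  cases hgo : pvGroupOf.get? kv.1 with
  | none =>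
    have hne : pvKeyAt g i ≠ kv.1 := by
      intro he
      rw [← he, pvGroupOf_key g i hg hi] at hgo
      exact absurd hgo (by simp)
    simp [hne]
  | some gi =>
    obtain ⟨g', i', hgi, hg', hi', hkey⟩ :=
      pvGroupOf_mem (kv.1, gi) (PySem.Dict.mem_items_of_get?_eq_some _ hgo)
    simp only at hgi hkey
    subst hgi
    have hslen : s.length = 4 := pvLen_of_shape s hs
    have hrlen : (PySem.List.pyGetD s (g' : Int) []).length = pvLens.getD g' 0 := by
      rw [PySem.List.pyGetD_natCast]; exact pvRowLen_of_shape s hs g' hg'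
    unfold pvCell
    rw [PySem.List.pyGetD_pySetD_natCast _ _ _ _ _ (by omega)]
    by_cases hgg : g = g'
    · subst hgg
      rw [if_pos rfl]
      rw [PySem.List.pyGetD_pySetD_natCast _ _ _ _ _ (by rw [hrlen]; exact hi')]
      by_cases hii : i = i'
      · subst hii
        rw [if_pos rfl, if_pos hkey]
      · have : pvKeyAt g i ≠ kv.1 := by
          intro he
          exact hii (pvKeyAt_inj g i g i' hg hi hg hi' (he.trans hkey.symm)).2
        rw [if_neg hii, if_neg this]
    · have : pvKeyAt g i ≠ kv.1 := by
        intro he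
        exact hgg (pvKeyAt_inj g i g' i' hg hi hg' hi' (he.trans hkey.symm)).1
      rw [if_neg hgg, if_neg this]

theorem pvFoldB_shape (l : List (String × String)) (s : List (List (Option (String × String))))
    (hs : s.map List.length = pvLens) : (l.foldl pvStepB s).map List.length = pvLens := by
  induction l generalizing s with
  | nil => exact hs
  | cons kv l ih => exact ih (pvStepB s kv) (pvStepB_shape s hs kv)

theorem pvCellFold (l : List (String × String)) (s : List (List (Option (String × String))))
    (hs : s.map List.length = pvLens) (g i : Nat) (hg : g < 4) (hi : i < pvLens.getD g 0) :
    pvCell (l.foldl pvStepB s) g i =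
      match pvLastVal l (pvKeyAt g i) with
      | some v => some (pvKeyAt g i, v)
      | none => pvCell s g i := by
  induction l generalizing s with
  | nil => rfl
  | cons kv l ih =>
    rw [List.foldl_cons, ih (pvStepB s kv) (pvStepB_shape s hs kv)]
    cases hlv : pvLastVal l (pvKeyAt g i) with
    | some v => simp [pvLastVal, hlv]
    | none =>
      rw [pvCellStep s hs kv g i hg hi]
      simp only [pvLastVal, hlv]
      by_cases hk : kv.1 = pvKeyAt g i
      · rw [if_pos hk.symm, if_pos hk, ← hk]
      · rw [if_neg (fun e => hk e.symm), if_neg hk]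

def pvSlots0 : List (List (Option (String × String))) :=
  pvGroups.map (fun ks => ks.map (fun _ => (none : Option (String × String))))

theorem pvSlots0_shape : pvSlots0.map List.length = pvLens := by decide

theorem pvCell_slots0 (g i : Nat) (hg : g < 4) (hi : i < pvLens.getD g 0) :
    pvCell pvSlots0 g i = none := by
  interval_cases g <;> simp [pvLens] at hi <;> interval_cases i <;> decide

def pvSpecRow (d : PySem.Dict String String) (ks : List String) : List (String × String) :=
  ks.filterMap (fun k => (d.get? k).map (fun v => (k, v)))

theorem pvA_eq (validated_data : List (String × String)) :
    split_typed_payload_update validated_data =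
      [pvSpecRow (PySem.Dict.ofList validated_data) pvApiKeys,
       pvSpecRow (PySem.Dict.ofList validated_data) pvPerfKeys,
       pvSpecRow (PySem.Dict.ofList validated_data) pvSecurityKeys,
       pvSpecRow (PySem.Dict.ofList validated_data) pvUiKeys] := by
  set d := PySem.Dict.ofList validated_data with hd
  have hun : split_typed_payload_update validated_data =
      [(pvPick pvApiKeys d).1,
       (pvPick pvPerfKeys (pvPick pvApiKeys d).2).1,
       (pvPick pvSecurityKeys (pvPick pvPerfKeys (pvPick pvApiKeys d).2).2).1,
       (pvPick pvUiKeys (pvPick pvSecurityKeys (pvPick pvPerfKeys (pvPick pvApiKeys d).2).2).2).1] := rfl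
  have h1 : (pvPick pvApiKeys d).1 = pvApiKeys.filterMap
      (fun k => (d.get? k).map (fun v => (k, v))) := pvPick_fst _ (by decide) d
  have e1 : ∀ k ∈ pvPerfKeys, (pvPick pvApiKeys d).2.get? k = d.get? k := by
    intro k hk
    exact pvPick_snd _ _ _ (by fin_cases hk <;> decide)
  have e2 : ∀ k ∈ pvSecurityKeys, (pvPick pvPerfKeys (pvPick pvApiKeys d).2).2.get? k = d.get? k := by
    intro k hk
    rw [pvPick_snd _ _ _ (show k ∉ pvPerfKeys by fin_cases hk <;> decide),
        pvPick_snd _ _ _ (show k ∉ pvApiKeys by fin_cases hk <;> decide)]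
  have e3 : ∀ k ∈ pvUiKeys,
      (pvPick pvSecurityKeys (pvPick pvPerfKeys (pvPick pvApiKeys d).2).2).2.get? k = d.get? k := by
    intro k hk
    rw [pvPick_snd _ _ _ (show k ∉ pvSecurityKeys by fin_cases hk <;> decide),
        pvPick_snd _ _ _ (show k ∉ pvPerfKeys by fin_cases hk <;> decide),
        pvPick_snd _ _ _ (show k ∉ pvApiKeys by fin_cases hk <;> decide)]
  have h2 : (pvPick pvPerfKeys (pvPick pvApiKeys d).2).1 = pvPerfKeys.filterMap
      (fun k => (d.get? k).map (fun v => (k, v))) := by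
    rw [pvPick_fst _ (by decide)]
    exact List.filterMap_congr (fun k hk => by rw [e1 k hk])
  have h3 : (pvPick pvSecurityKeys (pvPick pvPerfKeys (pvPick pvApiKeys d).2).2).1 =
      pvSecurityKeys.filterMap (fun k => (d.get? k).map (fun v => (k, v))) := by
    rw [pvPick_fst _ (by decide)]
    exact List.filterMap_congr (fun k hk => by rw [e2 k hk])
  have h4 : (pvPick pvUiKeys
      (pvPick pvSecurityKeys (pvPick pvPerfKeys (pvPick pvApiKeys d).2).2).2).1 =
      pvUiKeys.filterMap (fun k => (d.get? k).map (fun v => (k, v))) := by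
    rw [pvPick_fst _ (by decide)]
    exact List.filterMap_congr (fun k hk => by rw [e3 k hk])
  rw [hun, h1, h2, h3, h4]
  simp only [pvSpecRow]

theorem pvLens_eq_groupLens (g : Nat) (hg : g < 4) :
    pvLens.getD g 0 = (pvGroups.getD g []).length := by
  interval_cases g <;> rfl

theorem pvB_eq (validated_data : List (String × String)) :
    split_typed_payload_update_alt validated_data =
      [pvSpecRow (PySem.Dict.ofList validated_data) pvApiKeys,
       pvSpecRow (PySem.Dict.ofList validated_data) pvPerfKeys,
       pvSpecRow (PySem.Dict.ofList validated_data) pvSecurityKeys,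
       pvSpecRow (PySem.Dict.ofList validated_data) pvUiKeys] := by
  set d := PySem.Dict.ofList validated_data with hd
  have hnd : (d.items.map Prod.fst).Nodup := PySem.Dict.nodup_keys_ofList validated_data
  have hun : split_typed_payload_update_alt validated_data =
      (d.items.foldl pvStepB pvSlots0).map (fun row => row.filterMap id) := rfl
  set slots := d.items.foldl pvStepB pvSlots0 with hslots
  have hsh : slots.map List.length = pvLens := pvFoldB_shape _ _ pvSlots0_shape
  have hdm : PySem.Dict.mk d.items = d := rfl
  have hcell : ∀ g i, g < 4 → i < pvLens.getD g 0 →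
      pvCell slots g i = (d.get? (pvKeyAt g i)).map (fun v => (pvKeyAt g i, v)) := by
    intro g i hg hi
    rw [hslots, pvCellFold _ _ pvSlots0_shape g i hg hi, pvLastVal_get? _ hnd, hdm]
    cases hgk : d.get? (pvKeyAt g i) with
    | some v => rfl
    | none => exact pvCell_slots0 g i hg hi
  have hrow : ∀ (g : Nat), g < 4 →
      slots.getD g [] = (pvGroups.getD g []).map
        (fun k => (d.get? k).map (fun v => (k, v))) := by
    intro g hg
    apply List.ext_getElem
    · rw [List.length_map, pvRowLen_of_shape slots hsh g hg, pvLens_eq_groupLens g hg]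
    · intro i h1 h2
      have hgl : i < (pvGroups.getD g []).length := by
        rwa [List.length_map] at h2
      have hi : i < pvLens.getD g 0 := by
        rw [pvLens_eq_groupLens g hg]; exact hgl
      have hc := hcell g i hg hi
      have hcl : pvCell slots g i = (slots.getD g [])[i] := by
        unfold pvCell
        rw [PySem.List.pyGetD_natCast, PySem.List.pyGetD_natCast,
            List.getD_eq_getElem _ _ h1]
      rw [List.getElem_map, ← List.getD_eq_getElem _ ("" : String) hgl, ← pvKeyAt,
          ← hcl, hc]
  have hslen : slots.length = 4 := pvLen_of_shape slots hsh
  rw [hun]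
  apply List.ext_getElem
  · simp [hslen]
  · intro g h1 h2
    have hg : g < 4 := by rw [List.length_map, hslen] at h1; exact h1
    rw [List.getElem_map, ← List.getD_eq_getElem _ ([] : List (Option (String × String)))
        (by rwa [hslen]), hrow g hg]
    interval_cases g <;>
      simp [pvSpecRow, List.filterMap_map, Function.comp, pvGroups]

-- ===== VERDICT (by name: the statement is the Claim_ definition above) =====
theorem split_typed_payload_update_spec : Claim_equal_split_typed_payload_update := by
  intro validated_data _
  unfold Spec_split_typed_payload_update
  rw [pvA_eq, pvB_eq]
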